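-- pv_equiv track=rewrite | github.com/EvieSovariel/Sovariel | sovariel 6.py | dp_prime_weighted_tree_sum
-- ===== SOURCE A (Python) =====
-- def dp_prime_weighted_tree_sum(size, depth, primes):
--     """DP exact prime-weighted: Base leaf i = primes[i], aggregate subtrees."""
--     # dp[k][i] = sum primes in subtree at level k rooted at i
--     dp = [[0] * size for _ in range(depth + 1)]
--     for i in range(size):
--         dp[0][i] = primes[i] if i < len(primes) else 0
--     for k in range(1, depth + 1):
--         for i in range(size):
--             dp[k][i] = dp[k-1][i]
--             if i + 1 < size:
--                 dp[k][i] += dp[k-1][i + 1]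
--     return sum(dp[depth])
-- ===== SOURCE B (Python) =====
-- def dp_prime_weighted_tree_sum(size, depth, primes):
--     """Closed form: each prime m contributes primes[m] * sum_{j<=min(depth,m)} C(depth, j)."""
--     total = 0
--     pref = 0
--     binom = 1  # C(depth, m), maintained incrementally
--     for m in range(min(size, len(primes))):
--         if m <= depth:
--             pref += binom
--             binom = binom * (depth - m) // (m + 1)
--         total += primes[m] * pref
--     return total
-- ===== Notes on version B (the rewrite author's own statement) =====
-- stated objective: faster
-- what changed: Replaces the (depth+1) x size DP table with a single pass over the primes that accumulates prefix sums of binomial coefficients C(depth,j), since position m contributes primes[m]*sum_{j<=min(depth,m)} C(depth,j).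
import Mathlib
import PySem

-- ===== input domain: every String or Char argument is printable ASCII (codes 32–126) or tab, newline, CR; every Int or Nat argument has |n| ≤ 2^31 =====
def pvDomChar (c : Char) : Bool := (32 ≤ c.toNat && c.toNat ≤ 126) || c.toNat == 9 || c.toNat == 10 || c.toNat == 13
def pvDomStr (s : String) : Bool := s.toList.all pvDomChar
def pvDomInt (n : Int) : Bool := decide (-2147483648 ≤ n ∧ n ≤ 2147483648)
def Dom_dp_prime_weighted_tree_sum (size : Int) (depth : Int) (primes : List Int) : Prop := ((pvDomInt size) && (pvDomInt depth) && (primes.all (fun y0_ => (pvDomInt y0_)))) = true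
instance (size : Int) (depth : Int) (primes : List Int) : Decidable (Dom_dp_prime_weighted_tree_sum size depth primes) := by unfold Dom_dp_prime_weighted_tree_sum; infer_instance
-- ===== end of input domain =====

set_option maxRecDepth 8000

-- B replaces A's (depth+1)×size DP table by one pass accumulating prefix sums of binomial
-- coefficients C(depth,j) (objective: faster).

-- ===== PORT A =====
-- dp[0][i] = primes[i] if i < len(primes) else 0
def pvRow0 (size : Nat) (primes : List Int) : List Int :=
  (List.range size).map (fun i => if i < primes.length then primes.getD i 0 else 0)

-- one k-iteration of A's inner loop: dp[k][i] = dp[k-1][i] (+ dp[k-1][i+1] if i+1 < size)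
def pvStepRow (size : Nat) (prev : List Int) : List Int :=
  (List.range size).map (fun i => prev.getD i 0 + (if i + 1 < size then prev.getD (i + 1) 0 else 0))

def dp_prime_weighted_tree_sum (size : Int) (depth : Int) (primes : List Int) : Int :=
  ((pvStepRow size.toNat)^[depth.toNat] (pvRow0 size.toNat primes)).sum

-- ===== PORT B =====
-- state = (total, pref, binom); binom tracks C(depth, m)
def pvBStep (depth : Int) (primes : List Int) (st : Int × Int × Int) (m : Nat) : Int × Int × Int :=
  let pb := if (m : Int) ≤ depth then
      (st.2.1 + st.2.2, PySem.Int.floordiv (st.2.2 * (depth - (m : Int))) ((m : Int) + 1))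
    else (st.2.1, st.2.2)
  (st.1 + primes.getD m 0 * pb.1, pb.1, pb.2)

def dp_prime_weighted_tree_sum_alt (size : Int) (depth : Int) (primes : List Int) : Int :=
  ((List.range (min size (primes.length : Int)).toNat).foldl (pvBStep depth primes) (0, 0, 1)).1

-- ===== PRECONDITION & SPEC =====
-- Pre_ excludes only depth < 0, on which A raises IndexError (dp has no rows).
def Pre_dp_prime_weighted_tree_sum (size : Int) (depth : Int) (primes : List Int) : Prop := 0 ≤ depth
instance (size : Int) (depth : Int) (primes : List Int) : Decidable (Pre_dp_prime_weighted_tree_sum size depth primes) := by unfold Pre_dp_prime_weighted_tree_sum; infer_instance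
def pvWitness_dp_prime_weighted_tree_sum : Int × Int × List Int := (2, 1, [2, 3])

def Spec_dp_prime_weighted_tree_sum (size : Int) (depth : Int) (primes : List Int) (out : Int) : Prop := out = dp_prime_weighted_tree_sum_alt size depth primes
instance (size : Int) (depth : Int) (primes : List Int) (out : Int) : Decidable (Spec_dp_prime_weighted_tree_sum size depth primes out) := by unfold Spec_dp_prime_weighted_tree_sum; infer_instance

-- ===== CLAIM (what is proved, stated in full; the proofs are below) =====
def Claim_equal_dp_prime_weighted_tree_sum : Prop := ∀ (size : Int) (depth : Int) (primes : List Int), Dom_dp_prime_weighted_tree_sum size depth primes → Pre_dp_prime_weighted_tree_sum size depth primes → Spec_dp_prime_weighted_tree_sum size depth primes (dp_prime_weighted_tree_sum size depth primes)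

-- ===== LEMMAS AND PROOFS =====

-- dp[t][i] as a total function (0 outside the row)
def pvG (sz : Nat) (p : List Int) (t i : Nat) : Int :=
  ((pvStepRow sz)^[t] (pvRow0 sz p)).getD i 0

-- the leaf value at position m (0 beyond min sz (len p))
def pvB (sz : Nat) (p : List Int) (m : Nat) : Int :=
  if m < min sz p.length then p.getD m 0 else 0

-- prefix sum of binomial coefficients of row t
def pvP (t m : Nat) : Int := ∑ j ∈ Finset.range (m + 1), (t.choose j : Int)

theorem pv_len_iter (sz : Nat) (p : List Int) (t : Nat) :
    ((pvStepRow sz)^[t] (pvRow0 sz p)).length = sz := by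
  induction t with
  | zero => simp [pvRow0]
  | succ t ih => rw [Function.iterate_succ_apply']; simp [pvStepRow]

theorem pv_getD_range_map (sz : Nat) (h : Nat → Int) (i : Nat) :
    ((List.range sz).map h).getD i 0 = if i < sz then h i else 0 := by
  by_cases hi : i < sz
  · rw [List.getD_eq_getElem?_getD, List.getElem?_map, List.getElem?_range hi]
    simp [hi]
  · rw [List.getD_eq_default _ _ (by simpa using Nat.le_of_not_lt hi)]
    simp [hi]

theorem pvG_out (sz : Nat) (p : List Int) (t i : Nat) (hi : sz ≤ i) : pvG sz p t i = 0 := by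
  unfold pvG
  exact List.getD_eq_default _ _ (by rw [pv_len_iter]; exact hi)

theorem pvB_out (sz : Nat) (p : List Int) (m : Nat) (hm : min sz p.length ≤ m) :
    pvB sz p m = 0 := by
  unfold pvB; rw [if_neg (by omega)]

theorem pvG_zero (sz : Nat) (p : List Int) (i : Nat) : pvG sz p 0 i = pvB sz p i := by
  unfold pvG pvB pvRow0
  rw [Function.iterate_zero_apply, pv_getD_range_map]
  split_ifs <;> first | rfl | omega

theorem pvG_succ (sz : Nat) (p : List Int) (t i : Nat) :
    pvG sz p (t + 1) i = if i < sz then pvG sz p t i + pvG sz p t (i + 1) else 0 := by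
  conv_lhs => unfold pvG
  rw [Function.iterate_succ_apply']
  conv_lhs => rw [pvStepRow, pv_getD_range_map]
  by_cases hi : i < sz
  · rw [if_pos hi, if_pos hi]
    by_cases h2 : i + 1 < sz
    · rw [if_pos h2]; rfl
    · rw [if_neg h2, pvG_out sz p t (i + 1) (by omega)]
      rfl
  · rw [if_neg hi, if_neg hi]

theorem pv_pascal (sz : Nat) (p : List Int) (t : Nat) : ∀ i : Nat,
    pvG sz p t i = ∑ j ∈ Finset.range (t + 1), (t.choose j : Int) * pvB sz p (i + j) := by
  induction t with
  | zero => intro i; simp [pvG_zero]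
  | succ t ih =>
    intro i
    rw [pvG_succ]
    by_cases hi : i < sz
    · rw [if_pos hi, ih i, ih (i + 1)]
      have hshift : ∑ j ∈ Finset.range (t + 1), (t.choose (j + 1) : Int) * pvB sz p (i + (j + 1))
          = (∑ j ∈ Finset.range (t + 1), (t.choose j : Int) * pvB sz p (i + j)) - pvB sz p i := by
        have h1 := Finset.sum_range_succ' (fun j => (t.choose j : Int) * pvB sz p (i + j)) (t + 1)
        have h2 := Finset.sum_range_succ (fun j => (t.choose j : Int) * pvB sz p (i + j)) (t + 1)
        rw [Nat.choose_succ_self] at h2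
        simp only [Nat.choose_zero_right, Nat.cast_zero, Nat.cast_one, one_mul, add_zero,
          zero_mul] at h1 h2
        omega
      rw [Finset.sum_range_succ'
        (fun j => (((t + 1).choose j : Nat) : Int) * pvB sz p (i + j)) (t + 1)]
      simp only [Nat.choose_succ_succ, Nat.cast_add, add_mul, Nat.choose_zero_right,
        Nat.cast_one, one_mul, add_zero, Finset.sum_add_distrib]
      rw [hshift]
      have hidx : ∑ j ∈ Finset.range (t + 1), (t.choose j : Int) * pvB sz p (i + (j + 1))
          = ∑ j ∈ Finset.range (t + 1), (t.choose j : Int) * pvB sz p (i + 1 + j) := by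
        apply Finset.sum_congr rfl
        intro j _
        have h : i + (j + 1) = i + 1 + j := by omega
        rw [h]
      rw [hidx]
      ring
    · rw [if_neg hi]
      symm
      apply Finset.sum_eq_zero
      intro j _
      rw [pvB_out sz p (i + j) (by omega)]
      ring

theorem pv_sumG_succ (sz : Nat) (p : List Int) (t : Nat) :
    ∑ i ∈ Finset.range sz, pvG sz p (t + 1) i
      = 2 * (∑ i ∈ Finset.range sz, pvG sz p t i) - pvG sz p t 0 := by
  have hstep : ∑ i ∈ Finset.range sz, pvG sz p (t + 1) i
      = ∑ i ∈ Finset.range sz, (pvG sz p t i + pvG sz p t (i + 1)) := by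
    apply Finset.sum_congr rfl
    intro i hi
    rw [pvG_succ, if_pos (Finset.mem_range.mp hi)]
  have hshift := Finset.sum_range_succ' (fun i => pvG sz p t i) sz
  have hlast := Finset.sum_range_succ (fun i => pvG sz p t i) sz
  rw [pvG_out sz p t sz (le_refl sz)] at hlast
  rw [hstep, Finset.sum_add_distrib]
  omega

theorem pvP_zero (m : Nat) : pvP 0 m = 1 := by
  induction m with
  | zero => simp [pvP]
  | succ m ih =>
    unfold pvP at *
    rw [Finset.sum_range_succ, ih, Nat.choose_eq_zero_of_lt (by omega)]
    simp

theorem pvP_succ (t m : Nat) : pvP (t + 1) m = 2 * pvP t m - (t.choose m : Int) := by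
  unfold pvP
  have h0 := Finset.sum_range_succ' (fun j => (((t + 1).choose j : Nat) : Int)) m
  have h1 := Finset.sum_range_succ' (fun j => ((t.choose j : Nat) : Int)) m
  have h2 := Finset.sum_range_succ (fun j => ((t.choose j : Nat) : Int)) m
  simp only [Nat.choose_succ_succ, Nat.succ_eq_add_one, Nat.cast_add, Finset.sum_add_distrib,
    Nat.choose_zero_right, Nat.cast_one] at h0 h1 h2
  omega

theorem pv_ext (sz : Nat) (p : List Int) (t : Nat) :
    pvG sz p t 0 = ∑ m ∈ Finset.range (min sz p.length), p.getD m 0 * (t.choose m : Int) := by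
  have hL : ∑ j ∈ Finset.range (t + 1 + min sz p.length), (t.choose j : Int) * pvB sz p j
      = ∑ j ∈ Finset.range (t + 1), (t.choose j : Int) * pvB sz p j := by
    symm
    apply Finset.sum_subset
    · intro x hx
      simp only [Finset.mem_range] at *
      omega
    · intro j _ hj'
      rw [Nat.choose_eq_zero_of_lt (by simp only [Finset.mem_range] at hj'; omega)]
      simp
  have hR : ∑ j ∈ Finset.range (t + 1 + min sz p.length), (t.choose j : Int) * pvB sz p j
      = ∑ m ∈ Finset.range (min sz p.length), (t.choose m : Int) * pvB sz p m := by
    symm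
    apply Finset.sum_subset
    · intro x hx
      simp only [Finset.mem_range] at *
      omega
    · intro j _ hj'
      rw [pvB_out sz p j (by simp only [Finset.mem_range] at hj'; omega)]
      ring
  rw [pv_pascal sz p t 0]
  simp only [zero_add]
  rw [← hL, hR]
  apply Finset.sum_congr rfl
  intro m hm
  unfold pvB
  rw [if_pos (Finset.mem_range.mp hm)]
  ring

theorem pv_foldB (depth : Int) (primes : List Int) (hd : 0 ≤ depth) (N : Nat) :
    (List.range N).foldl (pvBStep depth primes) (0, 0, 1)
      = (∑ m ∈ Finset.range N, primes.getD m 0 * pvP depth.toNat m,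
         ∑ j ∈ Finset.range N, (depth.toNat.choose j : Int),
         (depth.toNat.choose N : Int)) := by
  have hdd : (depth.toNat : Int) = depth := Int.toNat_of_nonneg hd
  induction N with
  | zero => simp
  | succ N ih =>
    rw [List.range_succ, List.foldl_append, ih]
    simp only [List.foldl_cons, List.foldl_nil]
    unfold pvBStep
    have hP : pvP depth.toNat N
        = ∑ j ∈ Finset.range N, (depth.toNat.choose j : Int) + (depth.toNat.choose N : Int) := by
      rw [pvP, Finset.sum_range_succ]
    by_cases hN : (N : Int) ≤ depth
    · have hNd : N ≤ depth.toNat := by omega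
      have hmul : (depth.toNat.choose N : Int) * (depth - (N : Int))
          = (depth.toNat.choose (N + 1) : Int) * ((N : Int) + 1) := by
        have hnat := Nat.choose_succ_right_eq depth.toNat N
        have hc : ((depth.toNat.choose (N + 1) * (N + 1) : Nat) : Int)
            = ((depth.toNat.choose N * (depth.toNat - N) : Nat) : Int) := by exact_mod_cast hnat
        push_cast [Nat.cast_sub hNd] at hc
        rw [hdd] at hc
        exact hc.symm
      have hbin : PySem.Int.floordiv ((depth.toNat.choose N : Int) * (depth - (N : Int)))
            ((N : Int) + 1) = (depth.toNat.choose (N + 1) : Int) := by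
        rw [hmul, PySem.Int.floordiv_eq_ediv_of_pos (by omega)]
        exact Int.mul_ediv_cancel _ (by omega)
      simp only [if_pos hN, Prod.mk.injEq]
      refine ⟨?_, ?_, hbin⟩
      · rw [Finset.sum_range_succ, hP]
      · rw [Finset.sum_range_succ]
    · have hNd : depth.toNat < N := by omega
      have hch : depth.toNat.choose N = 0 := Nat.choose_eq_zero_of_lt hNd
      have hch1 : depth.toNat.choose (N + 1) = 0 := Nat.choose_eq_zero_of_lt (by omega)
      simp only [if_neg hN, Prod.mk.injEq]
      refine ⟨?_, ?_, ?_⟩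
      · rw [Finset.sum_range_succ, hP, hch]
        push_cast
        ring
      · rw [Finset.sum_range_succ, hch]
        simp
      · rw [hch, hch1]

theorem pv_main (sz : Nat) (p : List Int) (t : Nat) :
    ∑ i ∈ Finset.range sz, pvG sz p t i
      = ∑ m ∈ Finset.range (min sz p.length), p.getD m 0 * pvP t m := by
  induction t with
  | zero =>
    have hz : ∑ i ∈ Finset.range sz, pvG sz p 0 i = ∑ i ∈ Finset.range sz, pvB sz p i := by
      exact Finset.sum_congr rfl (fun i _ => pvG_zero sz p i)
    have hsz : ∑ i ∈ Finset.range sz, pvB sz p i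
        = ∑ m ∈ Finset.range (min sz p.length), pvB sz p m := by
      symm
      apply Finset.sum_subset
      · intro x hx
        simp only [Finset.mem_range] at *
        omega
      · intro m _ hm'
        exact pvB_out sz p m (by simp only [Finset.mem_range] at hm'; omega)
    rw [hz, hsz]
    apply Finset.sum_congr rfl
    intro m hm
    rw [pvP_zero]
    unfold pvB
    rw [if_pos (Finset.mem_range.mp hm)]
    ring
  | succ t ih =>
    rw [pv_sumG_succ, ih, pv_ext]
    have : ∀ m ∈ Finset.range (min sz p.length),
        p.getD m 0 * pvP (t + 1) m
          = 2 * (p.getD m 0 * pvP t m) - p.getD m 0 * (t.choose m : Int) := by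
      intro m _
      rw [pvP_succ]
      ring
    rw [Finset.sum_congr rfl this, Finset.sum_sub_distrib, ← Finset.mul_sum]

theorem pv_sum_getD (l : List Int) : l.sum = ∑ i ∈ Finset.range l.length, l.getD i 0 := by
  induction l with
  | nil => simp
  | cons a l ih =>
    rw [List.sum_cons, List.length_cons, Finset.sum_range_succ' (fun i => (a :: l).getD i 0)]
    simp [ih]
    omega

theorem pv_ports_eq (size depth : Int) (primes : List Int) (hd : 0 ≤ depth) :
    dp_prime_weighted_tree_sum size depth primes
      = dp_prime_weighted_tree_sum_alt size depth primes := by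
  unfold dp_prime_weighted_tree_sum dp_prime_weighted_tree_sum_alt
  have hn : (min size (primes.length : Int)).toNat = min size.toNat primes.length := by omega
  rw [hn, pv_foldB depth primes hd]
  rw [pv_sum_getD, pv_len_iter]
  exact pv_main size.toNat primes depth.toNat

-- ===== VERDICT (by name: the statement is the Claim_ definition above) =====
theorem dp_prime_weighted_tree_sum_spec : Claim_equal_dp_prime_weighted_tree_sum := by
  intro size depth primes _ hpre
  exact pv_ports_eq size depth primes hpre
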